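-- pv_equiv track=rewrite | github.com/edvinalestig/pocket-tram | busPosition.py | splitOnEqual
-- ===== SOURCE A (Python) =====
-- def splitOnEqual(arr):
--     if type(arr) != list:
--         raise TypeError("Expected list")
--     lists = []
--     tempList = []
--     i = 0
--     while i < len(arr)-1:
--         tempList.append(arr[i])
--         if arr[i] == arr[i+1]:
--             lists.append(tempList)
--             tempList = []
--         i += 1
--
--     tempList.append(arr[i])
--     lists.append(tempList)
--     return lists
-- ===== SOURCE B (Python) =====
-- def splitOnEqual(arr):
--     if type(arr) != list:
--         raise TypeError("Expected list")
--     cuts = [i + 1 for i in range(len(arr) - 1) if arr[i] == arr[i + 1]]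
--     bounds = [0] + cuts + [len(arr)]
--     return [arr[bounds[k]:bounds[k + 1]] for k in range(len(bounds) - 1)]
-- ===== Notes on version B (the rewrite author's own statement) =====
-- stated objective: alternative
-- what changed: Replaces the single stateful while-loop that grows a temp group element by element with an index-free two-phase plan: a comprehension collects the cut positions (i+1 wherever arr[i]==arr[i+1]) and the groups are produced by slicing arr between consecutive boundaries.
import Mathlib
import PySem

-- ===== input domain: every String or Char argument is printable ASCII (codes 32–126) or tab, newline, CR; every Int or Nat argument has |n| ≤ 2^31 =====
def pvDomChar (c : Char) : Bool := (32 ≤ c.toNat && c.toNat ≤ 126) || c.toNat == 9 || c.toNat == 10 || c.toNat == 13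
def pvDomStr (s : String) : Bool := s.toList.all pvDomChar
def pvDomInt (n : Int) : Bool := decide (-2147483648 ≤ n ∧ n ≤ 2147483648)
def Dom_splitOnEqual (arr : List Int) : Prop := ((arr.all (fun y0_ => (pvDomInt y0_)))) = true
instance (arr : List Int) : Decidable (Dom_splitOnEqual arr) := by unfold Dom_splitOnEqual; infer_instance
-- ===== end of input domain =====

-- B replaces A's stateful while-loop by a two-phase plan (collect cut indices, then slice
-- between consecutive boundaries); same cost, different decomposition ("alternative").


-- ===== PORT A =====
-- A's while-loop: state (lists, tempList) and index i; returns the final state together with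
-- the final i (Python's i after the loop).  arr[i]/arr[i+1] are in range while the loop runs,
-- so getD's default is never used on inputs satisfying Pre_.
def splitOnEqualLoop (arr : List Int) (i : Nat) (lists : List (List Int)) (temp : List Int) :
    List (List Int) × List Int × Nat :=
  if i < arr.length - 1 then
    let temp' := temp ++ [arr.getD i 0]
    if arr.getD i 0 = arr.getD (i + 1) 0 then
      splitOnEqualLoop arr (i + 1) (lists ++ [temp']) []
    else
      splitOnEqualLoop arr (i + 1) lists temp'
  else (lists, temp, i)
termination_by arr.length - 1 - i
decreasing_by all_goals omega

-- the trailing tempList.append(arr[i]); arr[i] raises IndexError on [] (i = 0), which Pre_ excludes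
def splitOnEqual (arr : List Int) : List (List Int) :=
  let r := splitOnEqualLoop arr 0 [] []
  r.1 ++ [r.2.1 ++ [arr.getD r.2.2 0]]

-- ===== PORT B =====
-- cuts = [i+1 for i in range(len(arr)-1) if arr[i] == arr[i+1]]
def pvCuts (arr : List Int) : List Nat :=
  ((List.range (arr.length - 1)).filter (fun i => arr.getD i 0 == arr.getD (i + 1) 0)).map (· + 1)

-- arr[bounds[k]:bounds[k+1]]: for 0 ≤ a, b ≤ len(arr) Python's arr[a:b] is exactly
-- (arr.drop a).take (b - a) (both clamp, and b < a gives []).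
def splitOnEqual_alt (arr : List Int) : List (List Int) :=
  let bounds := [0] ++ pvCuts arr ++ [arr.length]
  (List.range (bounds.length - 1)).map
    (fun k => (arr.drop (bounds.getD k 0)).take (bounds.getD (k + 1) 0 - bounds.getD k 0))

-- ===== PRECONDITION & SPEC =====
-- Pre_ excludes the empty list, on which A raises IndexError (the trailing arr[0] access).
def Pre_splitOnEqual (arr : List Int) : Prop := arr ≠ []
instance (arr : List Int) : Decidable (Pre_splitOnEqual arr) := by unfold Pre_splitOnEqual; infer_instance
def pvWitness_splitOnEqual : List Int := [1, 1, 2]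

def Spec_splitOnEqual (arr : List Int) (out : List (List Int)) : Prop := out = splitOnEqual_alt arr
instance (arr : List Int) (out : List (List Int)) : Decidable (Spec_splitOnEqual arr out) := by unfold Spec_splitOnEqual; infer_instance

-- ===== CLAIM (what is proved, stated in full; the proofs are below) =====
def Claim_equal_splitOnEqual : Prop := ∀ (arr : List Int), Dom_splitOnEqual arr → Pre_splitOnEqual arr → Spec_splitOnEqual arr (splitOnEqual arr)

-- ===== LEMMAS AND PROOFS =====

-- the common characterisation: groups of a::t, split after every equal adjacent pair
def pvChunks : Int → List Int → List (List Int)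
  | a, [] => [[a]]
  | a, b :: t =>
    if a = b then [a] :: pvChunks b t
    else match pvChunks b t with
      | [] => [[a]]          -- unreachable: pvChunks is never []
      | g :: gs => (a :: g) :: gs

-- prepend a prefix to the first group
def pvPre (temp : List Int) : List (List Int) → List (List Int)
  | [] => []
  | g :: gs => (temp ++ g) :: gs

theorem pvChunks_ne_nil (a : Int) (t : List Int) : pvChunks a t ≠ [] := by
  cases t with
  | nil => simp [pvChunks]
  | cons b t =>
    simp only [pvChunks]
    split
    · simp
    · split <;> simp

theorem pvChunks_cons (a b : Int) (t : List Int) :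
    pvChunks a (b :: t) = if a = b then [a] :: pvChunks b t else pvPre [a] (pvChunks b t) := by
  simp only [pvChunks]
  split
  · rfl
  · cases h : pvChunks b t with
    | nil => exact absurd h (pvChunks_ne_nil b t)
    | cons g gs => simp [pvPre]

theorem pvPre_nil (gs : List (List Int)) : pvPre [] gs = gs := by
  cases gs <;> simp [pvPre]

theorem pvPre_pvPre (t1 t2 : List Int) (gs : List (List Int)) :
    pvPre t1 (pvPre t2 gs) = pvPre (t1 ++ t2) gs := by
  cases gs <;> simp [pvPre]

-- A-side: loop invariant
theorem splitOnEqualLoop_inv (arr : List Int) :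
    ∀ (k i : Nat) (lists : List (List Int)) (temp : List Int),
      i < arr.length → arr.length - 1 - i = k →
      (splitOnEqualLoop arr i lists temp).1 ++
        [(splitOnEqualLoop arr i lists temp).2.1 ++
          [arr.getD (splitOnEqualLoop arr i lists temp).2.2 0]] =
      lists ++ pvPre temp (pvChunks (arr.getD i 0) (arr.drop (i + 1))) := by
  intro k
  induction k with
  | zero =>
    intro i lists temp hi hk
    have hge : ¬ i < arr.length - 1 := by omega
    rw [splitOnEqualLoop, if_neg hge]
    have : arr.drop (i + 1) = [] := by
      apply List.drop_eq_nil_of_le; omega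
    simp [this, pvChunks, pvPre]
  | succ k ih =>
    intro i lists temp hi hk
    have hlt : i < arr.length - 1 := by omega
    have hi1 : i + 1 < arr.length := by omega
    have hdrop : arr.drop (i + 1) = arr.getD (i + 1) 0 :: arr.drop (i + 2) := by
      rw [List.getD_eq_getElem _ _ hi1, ← List.getElem_cons_drop hi1]
    rw [splitOnEqualLoop, if_pos hlt, hdrop, pvChunks_cons]
    by_cases heq : arr.getD i 0 = arr.getD (i + 1) 0
    · rw [if_pos heq, if_pos heq,
        ih (i + 1) (lists ++ [temp ++ [arr.getD i 0]]) [] hi1 (by omega), pvPre_nil]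
      cases h : pvChunks (arr.getD (i + 1) 0) (arr.drop (i + 2)) with
      | nil => exact absurd h (pvChunks_ne_nil _ _)
      | cons g gs => simp [pvPre]
    · rw [if_neg heq, if_neg heq,
        ih (i + 1) lists (temp ++ [arr.getD i 0]) hi1 (by omega), pvPre_pvPre]

theorem splitOnEqual_eq_chunks (a : Int) (t : List Int) :
    splitOnEqual (a :: t) = pvChunks a t := by
  have h := splitOnEqualLoop_inv (a :: t) ((a :: t).length - 1 - 0) 0 [] []
    (by simp) rfl
  simpa [splitOnEqual, pvPre_nil] using h

-- B-side: slices over adjacent boundary pairs, recursively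
def pvSl (arr : List Int) : List Nat → List (List Int)
  | a :: b :: rest => ((arr.drop a).take (b - a)) :: pvSl arr (b :: rest)
  | _ => []

theorem slices_eq_pvSl (arr : List Int) (bounds : List Nat) :
    (List.range (bounds.length - 1)).map
      (fun k => (arr.drop (bounds.getD k 0)).take (bounds.getD (k + 1) 0 - bounds.getD k 0)) =
    pvSl arr bounds := by
  induction bounds with
  | nil => simp [pvSl]
  | cons a rest ih =>
    cases rest with
    | nil => simp [pvSl]
    | cons b rest' =>
      rw [pvSl]
      simp only [List.length_cons, Nat.add_sub_cancel] at *
      rw [List.range_succ_eq_map, List.map_cons, List.map_map]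
      congr 1

theorem pvSl_shift (x : Int) (arr : List Int) (bs : List Nat) :
    pvSl (x :: arr) (bs.map (· + 1)) = pvSl arr bs := by
  induction bs with
  | nil => simp [pvSl]
  | cons a rest ih =>
    cases rest with
    | nil => simp [pvSl]
    | cons b rest' =>
      simp only [List.map_cons] at *
      rw [pvSl, pvSl, ih]
      have hab : b + 1 - (a + 1) = b - a := by omega
      simp [hab]

theorem pvCuts_cons₂ (a b : Int) (t : List Int) :
    pvCuts (a :: b :: t) = (if a = b then [1] else []) ++ (pvCuts (b :: t)).map (· + 1) := by
  simp only [pvCuts, List.length_cons, Nat.add_sub_cancel, List.range_succ_eq_map,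
    List.filter_cons, List.filter_map, List.map_map]
  by_cases h : a = b
  · simp [h, Function.comp_def]
  · simp [h, Function.comp_def]

theorem alt_eq_pvSl (arr : List Int) :
    splitOnEqual_alt arr = pvSl arr (0 :: (pvCuts arr ++ [arr.length])) := by
  simp only [splitOnEqual_alt]
  exact slices_eq_pvSl arr _

theorem pvSl_zero_shift (x : Int) (arr : List Int) (c : Nat) (bs : List Nat) :
    pvSl (x :: arr) (0 :: (c :: bs).map (· + 1)) = pvPre [x] (pvSl arr (0 :: c :: bs)) := by
  simp only [List.map_cons]
  rw [pvSl]
  have h2 := pvSl_shift x arr (c :: bs)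
  simp only [List.map_cons] at h2
  rw [h2, pvSl]
  simp [pvPre, List.take_succ_cons]

theorem pvSl_pos (x : Int) (arr : List Int) (bs : List Nat) :
    pvSl (x :: arr) (0 :: (0 :: bs).map (· + 1)) = [x] :: pvSl arr (0 :: bs) := by
  simp only [List.map_cons]
  rw [pvSl]
  have h2 := pvSl_shift x arr (0 :: bs)
  simp only [List.map_cons] at h2
  rw [h2]
  simp

theorem alt_eq_chunks (a : Int) (t : List Int) :
    splitOnEqual_alt (a :: t) = pvChunks a t := by
  induction t generalizing a with
  | nil => rfl
  | cons b t' ih =>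
    rw [alt_eq_pvSl, pvCuts_cons₂, pvChunks_cons]
    have hlen : (a :: b :: t').length = (b :: t').length + 1 := by simp
    by_cases h : a = b
    · rw [if_pos h, if_pos h]
      have hbd : ([1] ++ (pvCuts (b :: t')).map (· + 1)) ++ [(a :: b :: t').length]
          = (0 :: (pvCuts (b :: t') ++ [(b :: t').length])).map (· + 1) := by
        simp [hlen]
      rw [hbd, pvSl_pos, ← alt_eq_pvSl, ih b]
    · rw [if_neg h, if_neg h]
      obtain ⟨c, bs, hcb⟩ : ∃ c bs, pvCuts (b :: t') ++ [(b :: t').length] = c :: bs := by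
        cases hx : pvCuts (b :: t') ++ [(b :: t').length] with
        | nil => simp at hx
        | cons c bs => exact ⟨c, bs, rfl⟩
      have hbd : ([] ++ (pvCuts (b :: t')).map (· + 1)) ++ [(a :: b :: t').length]
          = (c :: bs).map (· + 1) := by
        rw [← hcb]; simp [hlen]
      rw [hbd, pvSl_zero_shift, ← hcb, ← alt_eq_pvSl, ih b]

-- ===== VERDICT (by name: the statement is the Claim_ definition above) =====
theorem splitOnEqual_spec : Claim_equal_splitOnEqual := by
  intro arr _ hpre
  unfold Spec_splitOnEqual
  cases arr with
  | nil => exact absurd rfl hpre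
  | cons a t => rw [splitOnEqual_eq_chunks, alt_eq_chunks]
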